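-- pv_equiv track=rewrite | github.com/gaodz-111/my_research | FineLIP-main/FineLIP-main/train/train_withpeb_crossnet.py | _align_words_to_tokens
-- ===== SOURCE A (Python) =====
-- def _align_words_to_tokens(text, tokens, words, token_start_offset=1):
--     """
--     tokens: list[str]，由 SimpleTokenizer 解码得到（不包含起始/终止 token）
--     token_start_offset: CLIP 模型会在开头加 <|startoftext|>，需要加偏移
--     """
--     word_to_tokens = []
--     ptr = 0
--     for word in words:
--         start = text.lower().find(word.lower(), ptr)
--         if start == -1:
--             # 找不到词，用 -1 标记
--             word_to_tokens.append({"start": -1, "end": -1, "center": -1})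
--             continue
--         end = start + len(word)
--         ptr = end
--
--         token_start = None
--         token_end = None
--         char_pos = 0
--         for i, token in enumerate(tokens):
--             token_clean = token.replace("</w>", "")
--             token_len = len(token_clean)
--             if token_start is None and char_pos + token_len > start:
--                 token_start = i + token_start_offset
--             if char_pos < end:
--                 token_end = i + token_start_offset
--             char_pos += token_len
--
--         if token_start is None or token_end is None:
--             word_to_tokens.append({"start": -1, "end": -1, "center": -1})
--         else:
--             center_token = (token_start + token_end) // 2
--             word_to_tokens.append({
--                 "start": token_start,
--                 "end": token_end,
--                 "center": center_token
--             })
--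
--     return word_to_tokens
-- ===== SOURCE B (Python) =====
-- def _lower_bound(prefix, lo, hi, x):
--     # least k in [lo, hi) with prefix[k] > x, else hi (prefix is nondecreasing)
--     while lo < hi:
--         mid = (lo + hi) // 2
--         if prefix[mid] > x:
--             hi = mid
--         else:
--             lo = mid + 1
--     return lo
--
--
-- def _align_words_to_tokens(text, tokens, words, token_start_offset=1):
--     # Precompute the character-offset prefix array of the cleaned tokens once,
--     # then binary-search each word's start/end instead of rescanning all tokens.
--     lower_text = text.lower()
--     prefix = [0]
--     total = 0
--     for token in tokens:
--         total += len(token.replace("</w>", ""))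
--         prefix.append(total)
--     n = len(tokens)
--
--     word_to_tokens = []
--     ptr = 0
--     for word in words:
--         start = lower_text.find(word.lower(), ptr)
--         if start == -1:
--             word_to_tokens.append({"start": -1, "end": -1, "center": -1})
--             continue
--         end = start + len(word)
--         ptr = end
--         k = _lower_bound(prefix, 1, n + 1, start)   # first token covering `start`
--         m = _lower_bound(prefix, 0, n, end - 1)     # one past last token starting before `end`
--         if k == n + 1 or m == 0:
--             word_to_tokens.append({"start": -1, "end": -1, "center": -1})
--         else:
--             token_start = k - 1 + token_start_offset
--             token_end = m - 1 + token_start_offset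
--             word_to_tokens.append({
--                 "start": token_start,
--                 "end": token_end,
--                 "center": (token_start + token_end) // 2
--             })
--     return word_to_tokens
-- ===== Notes on version B (the rewrite author's own statement) =====
-- stated objective: faster
-- what changed: B precomputes the cleaned-token char-offset prefix array once and binary-searches each word's start/end token index, instead of rescanning (and re-cleaning) all tokens for every word.
import Mathlib
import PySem

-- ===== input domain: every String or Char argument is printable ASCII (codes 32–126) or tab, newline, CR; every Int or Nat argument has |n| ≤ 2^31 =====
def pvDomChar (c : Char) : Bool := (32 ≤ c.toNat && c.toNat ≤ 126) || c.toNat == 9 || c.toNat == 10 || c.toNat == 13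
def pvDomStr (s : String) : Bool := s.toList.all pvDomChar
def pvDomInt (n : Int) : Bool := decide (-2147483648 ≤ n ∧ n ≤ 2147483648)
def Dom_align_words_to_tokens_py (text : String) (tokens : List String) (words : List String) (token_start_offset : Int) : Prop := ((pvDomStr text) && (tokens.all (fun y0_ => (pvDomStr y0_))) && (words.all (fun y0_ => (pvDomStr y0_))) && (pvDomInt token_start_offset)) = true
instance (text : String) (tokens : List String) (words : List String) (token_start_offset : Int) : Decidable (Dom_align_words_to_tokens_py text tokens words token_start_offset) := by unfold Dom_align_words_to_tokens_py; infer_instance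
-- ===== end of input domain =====

-- ===== PORT A =====
-- B re-implements A with a precomputed char-offset prefix array and binary search per word ('faster').
def pvCleanLen (t : String) : Int := PySem.Str.len (PySem.Str.replace t "</w>" "")

def pvAStep (start end_ off : Int) (st : Option Int × Option Int × Int) (p : Int × String) : Option Int × Option Int × Int :=
  let ts := st.1
  let te := st.2.1
  let cp := st.2.2
  let token_len := pvCleanLen p.2
  let ts := if ts = none ∧ start < cp + token_len then some (p.1 + off) else ts
  let te := if cp < end_ then some (p.1 + off) else te
  (ts, te, cp + token_len)

def pvMiss : List (String × Int) := [("start", -1), ("end", -1), ("center", -1)]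

def align_words_to_tokens_py (text : String) (tokens : List String) (words : List String) (token_start_offset : Int) : List (List (String × Int)) :=
  (words.foldl (fun (st : List (List (String × Int)) × Int) word =>
    let acc := st.1
    let ptr := st.2
    let start := PySem.Str.findFrom (PySem.Str.lower text) (PySem.Str.lower word) ptr none
    if start = -1 then (acc ++ [pvMiss], ptr)
    else
      let end_ := start + PySem.Str.len word
      let r := (PySem.List.enumerate tokens 0).foldl (pvAStep start end_ token_start_offset) (none, none, 0)
      match r.1, r.2.1 with
      | some ts, some te =>
          (acc ++ [[("start", ts), ("end", te), ("center", PySem.Int.floordiv (ts + te) 2)]], end_)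
      | _, _ => (acc ++ [pvMiss], end_)
    ) ([], 0)).1

-- ===== PORT B =====
def pvLB (pf : List Int) (lo hi x : Int) : Int :=
  if h : lo < hi then
    let mid := PySem.Int.floordiv (lo + hi) 2
    if x < PySem.List.pyGetD pf mid 0 then pvLB pf lo mid x else pvLB pf (mid + 1) hi x
  else lo
termination_by (hi - lo).toNat
decreasing_by
  · have h2 : PySem.Int.floordiv (lo + hi) 2 < hi := by
      rw [PySem.Int.floordiv_lt_iff_lt_mul (by omega)]; omega
    omega
  · have h1 := PySem.Int.floordiv_two_mid_bounds (lo := lo) (hi := hi) (le_of_lt h)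
    omega

def align_words_to_tokens_py_alt (text : String) (tokens : List String) (words : List String) (token_start_offset : Int) : List (List (String × Int)) :=
  let lower_text := PySem.Str.lower text
  let pt := tokens.foldl (fun (st : List Int × Int) token =>
      let total := st.2 + PySem.Str.len (PySem.Str.replace token "</w>" "")
      (st.1 ++ [total], total)) ([0], 0)
  let pfx := pt.1
  let n : Int := PySem.List.len tokens
  (words.foldl (fun (st : List (List (String × Int)) × Int) word =>
    let acc := st.1
    let ptr := st.2
    let start := PySem.Str.findFrom lower_text (PySem.Str.lower word) ptr none
    if start = -1 then (acc ++ [pvMiss], ptr)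
    else
      let end_ := start + PySem.Str.len word
      let k := pvLB pfx 1 (n + 1) start
      let m := pvLB pfx 0 n (end_ - 1)
      if k = n + 1 ∨ m = 0 then (acc ++ [pvMiss], end_)
      else
        let token_start := k - 1 + token_start_offset
        let token_end := m - 1 + token_start_offset
        (acc ++ [[("start", token_start), ("end", token_end),
                  ("center", PySem.Int.floordiv (token_start + token_end) 2)]], end_)
    ) ([], 0)).1

-- ===== PRECONDITION & SPEC =====
def Spec_align_words_to_tokens_py (text : String) (tokens : List String) (words : List String) (token_start_offset : Int) (out : List (List (String × Int))) : Prop := out = align_words_to_tokens_py_alt text tokens words token_start_offset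
instance (text : String) (tokens : List String) (words : List String) (token_start_offset : Int) (out : List (List (String × Int))) : Decidable (Spec_align_words_to_tokens_py text tokens words token_start_offset out) := by unfold Spec_align_words_to_tokens_py; infer_instance

-- ===== CLAIM (what is proved, stated in full; the proofs are below) =====
def Claim_equal_align_words_to_tokens_py : Prop := ∀ (text : String) (tokens : List String) (words : List String) (token_start_offset : Int), Dom_align_words_to_tokens_py text tokens words token_start_offset → Spec_align_words_to_tokens_py text tokens words token_start_offset (align_words_to_tokens_py text tokens words token_start_offset)


-- ===== LEMMAS AND PROOFS =====

-- prefix sums of cleaned token lengths (proof-only helper)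
def pvP (tokens : List String) (k : Nat) : Int := ((tokens.map pvCleanLen).take k).sum

theorem pvCleanLen_nonneg (t : String) : 0 ≤ pvCleanLen t := by
  simp [pvCleanLen, PySem.Str.len_eq]

theorem pvSum_take_mono (L : List Int) (h : ∀ x ∈ L, 0 ≤ x) :
    ∀ j k : Nat, j ≤ k → (L.take j).sum ≤ (L.take k).sum := by
  induction L with
  | nil => intro j k _; simp
  | cons y L ih =>
    intro j k hjk
    have hy : 0 ≤ y := h y (List.mem_cons_self)
    have hL : ∀ z ∈ L, 0 ≤ z := fun z hz => h z (List.mem_cons_of_mem _ hz)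
    cases j with
    | zero =>
      cases k with
      | zero => simp
      | succ k =>
        simp only [List.take_zero, List.sum_nil, List.take_succ_cons, List.sum_cons]
        have := ih hL 0 k (Nat.zero_le _)
        simp only [List.take_zero, List.sum_nil] at this
        linarith
    | succ j =>
      cases k with
      | zero => omega
      | succ k =>
        simp only [List.take_succ_cons, List.sum_cons]
        have := ih hL j k (by omega)
        linarith

theorem pvP_mono (tokens : List String) {j k : Nat} (hjk : j ≤ k) :
    pvP tokens j ≤ pvP tokens k := by
  apply pvSum_take_mono _ _ _ _ hjk
  intro y hy
  rcases List.mem_map.mp hy with ⟨t, _, rfl⟩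
  exact pvCleanLen_nonneg t

theorem pvP_append (tokens : List String) (t : String) {k : Nat} (hk : k ≤ tokens.length) :
    pvP (tokens ++ [t]) k = pvP tokens k := by
  unfold pvP
  rw [List.map_append, List.take_append_of_le_length (by simpa using hk)]

theorem pvP_append_last (tokens : List String) (t : String) :
    pvP (tokens ++ [t]) (tokens.length + 1) = pvP tokens tokens.length + pvCleanLen t := by
  unfold pvP
  rw [List.map_append, List.take_of_length_le (by simp), List.sum_append,
      List.take_of_length_le (by simp)]
  simp

theorem pvBuild_gen (toks : List String) (acc : List Int) (tot : Int) :
    toks.foldl (fun (st : List Int × Int) token =>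
      let total := st.2 + PySem.Str.len (PySem.Str.replace token "</w>" "")
      (st.1 ++ [total], total)) (acc, tot)
    = (acc ++ (List.range toks.length).map (fun k => tot + pvP toks (k + 1)),
       tot + pvP toks toks.length) := by
  induction toks generalizing acc tot with
  | nil => simp [pvP]
  | cons t rest ih =>
    simp only [List.foldl_cons]
    rw [ih]
    have hP : ∀ k : Nat, pvP (t :: rest) (k + 1)
        = PySem.Str.len (PySem.Str.replace t "</w>" "") + pvP rest k := by
      intro k; simp [pvP, pvCleanLen]
    simp only [Prod.mk.injEq]
    refine ⟨?_, ?_⟩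
    · simp only [List.length_cons, List.range_succ_eq_map, List.map_cons, List.map_map,
        List.append_assoc, List.singleton_append]
      congr 1
      congr 1
      apply List.map_congr_left
      intro k _
      simp only [Function.comp_apply, hP (k + 1)]
      omega
    · rw [List.length_cons, hP rest.length]
      omega

theorem pvBuild (toks : List String) :
    (toks.foldl (fun (st : List Int × Int) token =>
      let total := st.2 + PySem.Str.len (PySem.Str.replace token "</w>" "")
      (st.1 ++ [total], total)) ([0], 0)).1
    = (List.range (toks.length + 1)).map (fun k => pvP toks k) := by
  rw [pvBuild_gen]
  simp only [List.range_succ_eq_map, List.map_cons, List.map_map]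
  show (0 : Int) :: _ = _
  congr 1
  apply List.map_congr_left
  intro k _
  simp [Function.comp]

theorem pvLB_spec_aux (pf : List Int) (x : Int)
    (hmono : ∀ j k : Int, 0 ≤ j → j ≤ k → k < (pf.length : Int) →
      PySem.List.pyGetD pf j 0 ≤ PySem.List.pyGetD pf k 0) :
    ∀ (N : Nat) (lo hi : Int), (hi - lo).toNat ≤ N → 0 ≤ lo → lo ≤ hi → hi ≤ (pf.length : Int) →
    lo ≤ pvLB pf lo hi x ∧ pvLB pf lo hi x ≤ hi ∧
    (∀ j : Int, lo ≤ j → j < pvLB pf lo hi x → PySem.List.pyGetD pf j 0 ≤ x) ∧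
    (∀ j : Int, pvLB pf lo hi x ≤ j → j < hi → x < PySem.List.pyGetD pf j 0) := by
  intro N
  induction N with
  | zero =>
    intro lo hi hN hlo hlh hhi
    have : ¬ lo < hi := by omega
    rw [pvLB, dif_neg this]
    refine ⟨le_refl _, hlh, ?_, ?_⟩ <;> intro j h1 h2 <;> omega
  | succ N ih =>
    intro lo hi hN hlo hlh hhi
    by_cases h : lo < hi
    · rw [pvLB, dif_pos h]
      have hmb := PySem.Int.floordiv_two_mid_bounds (lo := lo) (hi := hi) (le_of_lt h)
      have hmid_lt : PySem.Int.floordiv (lo + hi) 2 < hi := by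
        rw [PySem.Int.floordiv_lt_iff_lt_mul (by omega)]; omega
      set mid := PySem.Int.floordiv (lo + hi) 2 with hmid
      simp only []
      by_cases hx : x < PySem.List.pyGetD pf mid 0
      · rw [if_pos hx]
        obtain ⟨a1, a2, a3, a4⟩ := ih lo mid (by omega) hlo (by omega) (by omega)
        refine ⟨a1, by omega, a3, ?_⟩
        intro j hj1 hj2
        by_cases hjm : j < mid
        · exact a4 j hj1 hjm
        · calc x < PySem.List.pyGetD pf mid 0 := hx
            _ ≤ PySem.List.pyGetD pf j 0 := hmono mid j (by omega) (by omega) (by omega)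
      · rw [if_neg hx]
        have hx2 : PySem.List.pyGetD pf mid 0 ≤ x := by omega
        obtain ⟨a1, a2, a3, a4⟩ := ih (mid + 1) hi (by omega) (by omega) (by omega) hhi
        refine ⟨by omega, a2, ?_, a4⟩
        intro j hj1 hj2
        by_cases hjm : mid + 1 ≤ j
        · exact a3 j hjm hj2
        · calc PySem.List.pyGetD pf j 0 ≤ PySem.List.pyGetD pf mid 0 :=
                hmono j mid (by omega) (by omega) (by omega)
            _ ≤ x := hx2
    · rw [pvLB, dif_neg h]
      refine ⟨le_refl _, hlh, ?_, ?_⟩ <;> intro j h1 h2 <;> omega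

theorem pvLB_spec (pf : List Int) (lo hi x : Int) (hlo : 0 ≤ lo) (hlh : lo ≤ hi)
    (hhi : hi ≤ (pf.length : Int))
    (hmono : ∀ j k : Int, 0 ≤ j → j ≤ k → k < (pf.length : Int) →
      PySem.List.pyGetD pf j 0 ≤ PySem.List.pyGetD pf k 0) :
    lo ≤ pvLB pf lo hi x ∧ pvLB pf lo hi x ≤ hi ∧
    (∀ j : Int, lo ≤ j → j < pvLB pf lo hi x → PySem.List.pyGetD pf j 0 ≤ x) ∧
    (∀ j : Int, pvLB pf lo hi x ≤ j → j < hi → x < PySem.List.pyGetD pf j 0) := by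
  exact pvLB_spec_aux pf x hmono (hi - lo).toNat lo hi (le_refl _) hlo hlh hhi

theorem pvFind?_congr {a : Type} (p q : a → Bool) (l : List a) (h : ∀ y ∈ l, p y = q y) :
    l.find? p = l.find? q := by
  induction l with
  | nil => rfl
  | cons y l ih =>
    simp only [List.find?_cons, h y (List.mem_cons_self)]
    cases q y <;> simp [ih (fun z hz => h z (List.mem_cons_of_mem _ hz))]

theorem pvRange_find?_eq_none (p : Nat → Bool) (n : Nat) (h : ∀ j, j < n → p j = false) :
    (List.range n).find? p = none := by
  simp only [List.find?_eq_none, List.mem_range]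
  intro j hj
  simp [h j hj]

theorem pvRange_find?_eq_some (p : Nat → Bool) (n m : Nat) (hm : m < n) (hp : p m = true)
    (hmin : ∀ j, j < m → p j = false) : (List.range n).find? p = some m := by
  induction n with
  | zero => omega
  | succ n ih =>
    rw [List.range_succ, List.find?_append]
    rcases Nat.lt_succ_iff_lt_or_eq.mp hm with hlt | heq
    · rw [ih hlt]; rfl
    · rw [pvRange_find?_eq_none p n (fun j hj => hmin j (by omega))]
      simp [heq ▸ hp]
      omega

theorem pvRevRange_find?_eq_some (p : Nat → Bool) (n m : Nat) (hm : m < n) (hp : p m = true)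
    (hmax : ∀ j, m < j → j < n → p j = false) :
    (List.range n).reverse.find? p = some m := by
  induction n with
  | zero => omega
  | succ n ih =>
    rw [List.range_succ, List.reverse_append]
    rcases Nat.lt_succ_iff_lt_or_eq.mp hm with hlt | heq
    · have hn : p n = false := hmax n hlt (Nat.lt_succ_self n)
      simpa [hn] using ih hlt (fun j hj hjn => hmax j hj (Nat.lt_succ_of_lt hjn))
    · simp [heq ▸ hp]
      omega

theorem pvRevRange_find?_eq_none (p : Nat → Bool) (n : Nat) (h : ∀ j, j < n → p j = false) :
    (List.range n).reverse.find? p = none := by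
  simp only [List.find?_eq_none, List.mem_reverse, List.mem_range]
  intro j hj
  simp [h j hj]

theorem pvAInner (tokens : List String) (start end_ off : Int) :
    (PySem.List.enumerate tokens 0).foldl (pvAStep start end_ off) (none, none, 0)
    = (((List.range tokens.length).find? (fun i => decide (start < pvP tokens (i + 1)))).map
         (fun i => (i : Int) + off),
       ((List.range tokens.length).reverse.find? (fun i => decide (pvP tokens i < end_))).map
         (fun i => (i : Int) + off),
       pvP tokens tokens.length) := by
  induction tokens using List.reverseRecOn with
  | nil => simp [PySem.List.enumerate_nil, pvP]
  | append_singleton xs x ih =>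
    rw [PySem.List.enumerate_append, List.foldl_append, ih]
    simp only [PySem.List.enumerate_cons, PySem.List.enumerate_nil, List.foldl_cons,
      List.foldl_nil, List.length_append, List.length_singleton]
    have hc1 : (List.range xs.length).find?
          (fun i => decide (start < pvP (xs ++ [x]) (i + 1)))
        = (List.range xs.length).find? (fun i => decide (start < pvP xs (i + 1))) := by
      apply pvFind?_congr
      intro y hy
      rw [pvP_append xs x (by simpa using List.mem_range.mp hy)]
    have hc2 : ((List.range xs.length).reverse).find?
          (fun i => decide (pvP (xs ++ [x]) i < end_))
        = ((List.range xs.length).reverse).find? (fun i => decide (pvP xs i < end_)) := by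
      apply pvFind?_congr
      intro y hy
      rw [pvP_append xs x (le_of_lt (List.mem_range.mp (List.mem_reverse.mp hy)))]
    rw [List.range_succ, List.find?_append, hc1]
    rw [List.reverse_append, List.reverse_singleton, List.singleton_append, List.find?_cons]
    have hlast : pvP (xs ++ [x]) (xs.length + 1) = pvP xs xs.length + pvCleanLen x :=
      pvP_append_last xs x
    have hlen : pvP (xs ++ [x]) xs.length = pvP xs xs.length := pvP_append xs x (le_refl _)
    unfold pvAStep
    rcases h1 : List.find? (fun i => decide (start < pvP xs (i + 1))) (List.range xs.length) with _ | a
    all_goals rcases h2 : List.find? (fun i => decide (pvP xs i < end_)) (List.range xs.length).reverse with _ | b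
    all_goals by_cases hs : start < pvP xs xs.length + pvCleanLen x
    all_goals by_cases he : pvP xs xs.length < end_
    all_goals simp [h2, hs, he, hc2, hlast, hlen]


theorem pvPfx_getD (tokens : List String) (j : Int) (h0 : 0 ≤ j) (h1 : j ≤ (tokens.length : Int)) :
    PySem.List.pyGetD ((List.range (tokens.length + 1)).map (fun k => pvP tokens k)) j 0
    = pvP tokens j.toNat := by
  rw [PySem.List.pyGetD_eq_getElem _ _ h0 (by simp; omega)]
  simp

theorem pvFold_eq_lb (tokens : List String) (start end_ off : Int) :
    (((PySem.List.enumerate tokens 0).foldl (pvAStep start end_ off) (none, none, 0)).1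
      = (if pvLB ((List.range (tokens.length + 1)).map (fun k => pvP tokens k)) 1 ((tokens.length : Int) + 1) start = (tokens.length : Int) + 1 then none
         else some (pvLB ((List.range (tokens.length + 1)).map (fun k => pvP tokens k)) 1 ((tokens.length : Int) + 1) start - 1 + off)))
    ∧ (((PySem.List.enumerate tokens 0).foldl (pvAStep start end_ off) (none, none, 0)).2.1
      = (if pvLB ((List.range (tokens.length + 1)).map (fun k => pvP tokens k)) 0 (tokens.length : Int) (end_ - 1) = 0 then none
         else some (pvLB ((List.range (tokens.length + 1)).map (fun k => pvP tokens k)) 0 (tokens.length : Int) (end_ - 1) - 1 + off))) := by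
  rw [pvAInner]
  set pf := (List.range (tokens.length + 1)).map (fun k => pvP tokens k) with hpf
  have hlen : (pf.length : Int) = (tokens.length : Int) + 1 := by simp [hpf]
  have hget : ∀ j : Int, 0 ≤ j → j ≤ (tokens.length : Int) →
      PySem.List.pyGetD pf j 0 = pvP tokens j.toNat := fun j h0 h1 => pvPfx_getD tokens j h0 h1
  have hmono : ∀ j k : Int, 0 ≤ j → j ≤ k → k < (pf.length : Int) →
      PySem.List.pyGetD pf j 0 ≤ PySem.List.pyGetD pf k 0 := by
    intro j k h0 hjk hk
    rw [hget j h0 (by omega), hget k (by omega) (by omega)]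
    exact pvP_mono tokens (by omega)
  constructor
  · obtain ⟨a1, a2, a3, a4⟩ := pvLB_spec pf 1 ((tokens.length : Int) + 1) start
      (by omega) (by omega) (by omega) hmono
    set K := pvLB pf 1 ((tokens.length : Int) + 1) start with hK
    by_cases hKe : K = (tokens.length : Int) + 1
    · rw [if_pos hKe]
      rw [pvRange_find?_eq_none]
      · rfl
      · intro j hj
        have := a3 ((j : Int) + 1) (by omega) (by omega)
        rw [hget ((j : Int) + 1) (by omega) (by omega)] at this
        simp only [decide_eq_false_iff_not, not_lt]
        have hn : ((j : Int) + 1).toNat = j + 1 := by omega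
        rw [hn] at this
        exact this
    · rw [if_neg hKe]
      rw [pvRange_find?_eq_some (m := (K - 1).toNat)]
      · simp; omega
      · omega
      · have := a4 K (le_refl _) (by omega)
        rw [hget K (by omega) (by omega)] at this
        simp only [decide_eq_true_eq]
        have hn : (K - 1).toNat + 1 = K.toNat := by omega
        rw [hn]
        exact this
      · intro j hj
        have := a3 ((j : Int) + 1) (by omega) (by omega)
        rw [hget ((j : Int) + 1) (by omega) (by omega)] at this
        simp only [decide_eq_false_iff_not, not_lt]
        have hn : ((j : Int) + 1).toNat = j + 1 := by omega
        rw [hn] at this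
        exact this
  · obtain ⟨a1, a2, a3, a4⟩ := pvLB_spec pf 0 (tokens.length : Int) (end_ - 1)
      (by omega) (by omega) (by omega) hmono
    set M := pvLB pf 0 (tokens.length : Int) (end_ - 1) with hM
    by_cases hMe : M = 0
    · rw [if_pos hMe]
      rw [pvRevRange_find?_eq_none]
      · rfl
      · intro j hj
        have := a4 (j : Int) (by omega) (by omega)
        rw [hget (j : Int) (by omega) (by omega)] at this
        simp only [decide_eq_false_iff_not, not_lt]
        have hn : ((j : Int)).toNat = j := by omega
        rw [hn] at this
        omega
    · rw [if_neg hMe]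
      rw [pvRevRange_find?_eq_some (m := (M - 1).toNat)]
      · simp; omega
      · omega
      · have := a3 (M - 1) (by omega) (by omega)
        rw [hget (M - 1) (by omega) (by omega)] at this
        simp only [decide_eq_true_eq]
        omega
      · intro j hj1 hj2
        have := a4 (j : Int) (by omega) (by omega)
        rw [hget (j : Int) (by omega) (by omega)] at this
        simp only [decide_eq_false_iff_not, not_lt]
        have hn : ((j : Int)).toNat = j := by omega
        rw [hn] at this
        omega
theorem pvOuter (text : String) (tokens : List String) (off : Int) (words : List String)
    (acc : List (List (String × Int))) (ptr : Int) :
    words.foldl (fun (st : List (List (String × Int)) × Int) word =>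
      let acc := st.1
      let ptr := st.2
      let start := PySem.Str.findFrom (PySem.Str.lower text) (PySem.Str.lower word) ptr none
      if start = -1 then (acc ++ [pvMiss], ptr)
      else
        let end_ := start + PySem.Str.len word
        let r := (PySem.List.enumerate tokens 0).foldl (pvAStep start end_ off) (none, none, 0)
        match r.1, r.2.1 with
        | some ts, some te =>
            (acc ++ [[("start", ts), ("end", te), ("center", PySem.Int.floordiv (ts + te) 2)]], end_)
        | _, _ => (acc ++ [pvMiss], end_)) (acc, ptr)
    = words.foldl (fun (st : List (List (String × Int)) × Int) word =>
      let acc := st.1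
      let ptr := st.2
      let start := PySem.Str.findFrom (PySem.Str.lower text) (PySem.Str.lower word) ptr none
      if start = -1 then (acc ++ [pvMiss], ptr)
      else
        let end_ := start + PySem.Str.len word
        let k := pvLB ((List.range (tokens.length + 1)).map (fun k => pvP tokens k)) 1 ((tokens.length : Int) + 1) start
        let m := pvLB ((List.range (tokens.length + 1)).map (fun k => pvP tokens k)) 0 (tokens.length : Int) (end_ - 1)
        if k = (tokens.length : Int) + 1 ∨ m = 0 then (acc ++ [pvMiss], end_)
        else
          let token_start := k - 1 + off
          let token_end := m - 1 + off
          (acc ++ [[("start", token_start), ("end", token_end),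
                    ("center", PySem.Int.floordiv (token_start + token_end) 2)]], end_)) (acc, ptr) := by
  induction words generalizing acc ptr with
  | nil => rfl
  | cons w rest ih =>
    simp only [List.foldl_cons]
    have hstep :
        (let acc' := acc
         let ptr' := ptr
         let start := PySem.Str.findFrom (PySem.Str.lower text) (PySem.Str.lower w) ptr none
         if start = -1 then (acc ++ [pvMiss], ptr)
         else
           let end_ := start + PySem.Str.len w
           let r := (PySem.List.enumerate tokens 0).foldl (pvAStep start end_ off) (none, none, 0)
           match r.1, r.2.1 with
           | some ts, some te =>
               (acc ++ [[("start", ts), ("end", te), ("center", PySem.Int.floordiv (ts + te) 2)]], end_)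
           | _, _ => (acc ++ [pvMiss], end_))
        = (let acc' := acc
           let ptr' := ptr
           let start := PySem.Str.findFrom (PySem.Str.lower text) (PySem.Str.lower w) ptr none
           if start = -1 then (acc ++ [pvMiss], ptr)
           else
             let end_ := start + PySem.Str.len w
             let k := pvLB ((List.range (tokens.length + 1)).map (fun k => pvP tokens k)) 1 ((tokens.length : Int) + 1) start
             let m := pvLB ((List.range (tokens.length + 1)).map (fun k => pvP tokens k)) 0 (tokens.length : Int) (end_ - 1)
             if k = (tokens.length : Int) + 1 ∨ m = 0 then (acc ++ [pvMiss], end_)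
             else
               let token_start := k - 1 + off
               let token_end := m - 1 + off
               (acc ++ [[("start", token_start), ("end", token_end),
                         ("center", PySem.Int.floordiv (token_start + token_end) 2)]], end_)) := by
      simp only []
      set start := PySem.Str.findFrom (PySem.Str.lower text) (PySem.Str.lower w) ptr none with hstart
      by_cases hs : start = -1
      · simp [hs]
      · rw [if_neg hs, if_neg hs]
        set end_ := start + PySem.Str.len w with hend
        obtain ⟨e1, e2⟩ := pvFold_eq_lb tokens start end_ off
        rw [e1, e2]
        set K := pvLB ((List.range (tokens.length + 1)).map (fun k => pvP tokens k)) 1 ((tokens.length : Int) + 1) start with hK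
        set M := pvLB ((List.range (tokens.length + 1)).map (fun k => pvP tokens k)) 0 (tokens.length : Int) (end_ - 1) with hM
        by_cases hk : K = (tokens.length : Int) + 1 <;> by_cases hm : M = 0 <;>
          simp [hk, hm]
    rw [hstep]
    exact ih _ _

-- ===== VERDICT (by name: the statement is the Claim_ definition above) =====
theorem align_words_to_tokens_py_spec : Claim_equal_align_words_to_tokens_py := by
  intro text tokens words off _
  unfold Spec_align_words_to_tokens_py align_words_to_tokens_py align_words_to_tokens_py_alt
  simp only [pvBuild, PySem.List.len_eq]
  rw [pvOuter]
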